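-- pv_equiv track=rewrite | github.com/subhajitmandal797/Retrieval-Augmented-Generation | chat.py | compose_context
-- ===== SOURCE A (Python) =====
-- from typing import Any, Dict, List
--
-- def compose_context(documents: List[str], metadatas: List[Dict[str, Any]], cap: int = 8000) -> str:
--     out, used = [], 0
--     for d, m in zip(documents, metadatas):
--         src = m.get("file", m.get("source", "kb"))
--         seg = f"\n---\nSource: {src}\n---\n{d}"
--         if used + len(seg) > cap:
--             break
--         out.append(seg)
--         used += len(seg)
--     return "\n".join(out)
-- ===== SOURCE B (Python) =====
-- def compose_context(documents, metadatas, cap=8000):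
--     segs = [
--         f"\n---\nSource: {m.get('file', m.get('source', 'kb'))}\n---\n{d}"
--         for d, m in zip(documents, metadatas)
--     ]
--     cum = []
--     total = 0
--     for s in segs:
--         total += len(s)
--         cum.append(total)
--     # binary search: first index whose running total exceeds cap
--     lo, hi = 0, len(cum)
--     while lo < hi:
--         mid = (lo + hi) // 2
--         if cum[mid] <= cap:
--             lo = mid + 1
--         else:
--             hi = mid
--     return "\n".join(segs[:lo])
-- ===== Notes on version B (the rewrite author's own statement) =====
-- stated objective: alternative
-- what changed: Replaces A's single running-accumulator loop with early break by building the full segment list, a prefix-sum table of cumulative lengths, and a hand-written binary search for the cutoff index, then joining the kept prefix.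
import Mathlib
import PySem

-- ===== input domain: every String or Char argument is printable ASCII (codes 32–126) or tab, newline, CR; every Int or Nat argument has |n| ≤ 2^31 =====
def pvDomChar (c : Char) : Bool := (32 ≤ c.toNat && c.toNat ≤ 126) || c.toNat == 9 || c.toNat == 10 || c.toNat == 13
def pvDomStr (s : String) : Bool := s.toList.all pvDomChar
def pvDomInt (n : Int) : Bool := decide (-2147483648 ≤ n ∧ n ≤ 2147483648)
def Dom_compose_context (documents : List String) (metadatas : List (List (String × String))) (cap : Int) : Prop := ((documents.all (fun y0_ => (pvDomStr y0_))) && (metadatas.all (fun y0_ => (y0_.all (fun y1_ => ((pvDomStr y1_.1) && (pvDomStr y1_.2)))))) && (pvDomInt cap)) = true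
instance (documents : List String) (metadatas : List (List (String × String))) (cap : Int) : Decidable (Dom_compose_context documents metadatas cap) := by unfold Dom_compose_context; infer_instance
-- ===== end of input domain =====

-- B rebuilds the same context by a prefix-sum table of segment lengths plus a binary search
-- for the cutoff, instead of A's running accumulator with an early break (objective: alternative).

-- ===== PORT A =====
-- the for-loop over zip(documents, metadatas) with `out`/`used` state and the early break
def ccA_loop (cap : Int) : List (String × List (String × String)) → List String → Int → List String
  | [], out, _ => out
  | (d, m) :: rest, out, used =>
    let dm := PySem.Dict.mk m
    let src := dm.getD "file" (dm.getD "source" "kb")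
    let seg := "\n---\nSource: " ++ src ++ "\n---\n" ++ d
    if used + PySem.Str.len seg > cap then out
    else ccA_loop cap rest (out ++ [seg]) (used + PySem.Str.len seg)

def compose_context (documents : List String) (metadatas : List (List (String × String))) (cap : Int) : String :=
  PySem.Str.join "\n" (ccA_loop cap (documents.zip metadatas) [] 0)

-- ===== PORT B =====
-- the f-string segment for one (document, metadata) pair
def ccB_seg (d : String) (m : List (String × String)) : String :=
  let dm := PySem.Dict.mk m
  "\n---\nSource: " ++ dm.getD "file" (dm.getD "source" "kb") ++ "\n---\n" ++ d

-- the `for s in segs: total += len(s); cum.append(total)` loop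
def ccB_cum : List String → Int → List Int
  | [], _ => []
  | s :: rest, total => (total + PySem.Str.len s) :: ccB_cum rest (total + PySem.Str.len s)

-- the hand-written binary-search while-loop; cum[mid] is ported as getD mid 0,
-- exact here because 0 ≤ lo ≤ mid < hi ≤ len(cum) whenever it is read
def ccB_search (cum : List Int) (cap : Int) (lo hi : Nat) : Nat :=
  if lo < hi then
    if cum.getD ((lo + hi) / 2) 0 ≤ cap then ccB_search cum cap ((lo + hi) / 2 + 1) hi
    else ccB_search cum cap lo ((lo + hi) / 2)
  else lo
termination_by hi - lo
decreasing_by all_goals omega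

def compose_context_alt (documents : List String) (metadatas : List (List (String × String))) (cap : Int) : String :=
  let segs := (documents.zip metadatas).map (fun p => ccB_seg p.1 p.2)
  let cum := ccB_cum segs 0
  let cut := ccB_search cum cap 0 cum.length
  PySem.Str.join "\n" (segs.take cut)

-- ===== PRECONDITION & SPEC =====
def Spec_compose_context (documents : List String) (metadatas : List (List (String × String))) (cap : Int) (out : String) : Prop := out = compose_context_alt documents metadatas cap
instance (documents : List String) (metadatas : List (List (String × String))) (cap : Int) (out : String) : Decidable (Spec_compose_context documents metadatas cap out) := by unfold Spec_compose_context; infer_instance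

-- ===== CLAIM (what is proved, stated in full; the proofs are below) =====
def Claim_equal_compose_context : Prop := ∀ (documents : List String) (metadatas : List (List (String × String))) (cap : Int), Dom_compose_context documents metadatas cap → Spec_compose_context documents metadatas cap (compose_context documents metadatas cap)

-- ===== LEMMAS AND PROOFS =====

-- A's loop, characterised without the accumulator
def ccGreedy (cap : Int) : List String → Int → List String
  | [], _ => []
  | s :: rest, used =>
    if used + PySem.Str.len s > cap then []
    else s :: ccGreedy cap rest (used + PySem.Str.len s)

theorem ccA_loop_eq_greedy (cap : Int) (pairs : List (String × List (String × String)))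
    (out : List String) (used : Int) :
    ccA_loop cap pairs out used
      = out ++ ccGreedy cap (pairs.map (fun p => ccB_seg p.1 p.2)) used := by
  induction pairs generalizing out used with
  | nil => simp [ccA_loop, ccGreedy]
  | cons p rest ih =>
    obtain ⟨d, m⟩ := p
    simp only [ccA_loop, ccGreedy, List.map_cons, ccB_seg]
    split
    · simp
    · rw [ih, List.append_assoc]
      rfl

theorem ccB_cum_length (segs : List String) (total : Int) :
    (ccB_cum segs total).length = segs.length := by
  induction segs generalizing total with
  | nil => simp [ccB_cum]
  | cons s rest ih => simp [ccB_cum, ih]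

theorem ccB_cum_le (segs : List String) (total : Int) (i : Nat)
    (h : i < segs.length) : total ≤ (ccB_cum segs total).getD i 0 := by
  induction segs generalizing total i with
  | nil => simp at h
  | cons s rest ih =>
    have hlen : (0:Int) ≤ PySem.Str.len s := by
      simp [PySem.Str.len_eq]
    cases i with
    | zero => simp only [ccB_cum, List.getD_cons_zero]; omega
    | succ j =>
      have := ih (total + PySem.Str.len s) j (by simpa using h)
      simp only [ccB_cum, List.getD_cons_succ]
      omega

theorem ccB_cum_mono (segs : List String) (total : Int) (i j : Nat)
    (hij : i ≤ j) (hj : j < segs.length) :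
    (ccB_cum segs total).getD i 0 ≤ (ccB_cum segs total).getD j 0 := by
  induction segs generalizing total i j with
  | nil => simp at hj
  | cons s rest ih =>
    cases i with
    | zero =>
      cases j with
      | zero => simp
      | succ j' =>
        have := ccB_cum_le rest (total + PySem.Str.len s) j' (by simpa using hj)
        simp only [ccB_cum, List.getD_cons_zero, List.getD_cons_succ]
        omega
    | succ i' =>
      cases j with
      | zero => omega
      | succ j' =>
        have := ih (total + PySem.Str.len s) i' j' (by omega) (by simpa using hj)
        simpa [ccB_cum] using this

theorem ccB_search_spec (cum : List Int) (cap : Int) (lo hi : Nat)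
    (mono : ∀ i j, i ≤ j → j < cum.length → cum.getD i 0 ≤ cum.getD j 0)
    (hhi : hi ≤ cum.length) (hlh : lo ≤ hi)
    (hbelow : ∀ i, i < lo → cum.getD i 0 ≤ cap)
    (habove : ∀ i, hi ≤ i → i < cum.length → cap < cum.getD i 0) :
    (∀ i, i < ccB_search cum cap lo hi → cum.getD i 0 ≤ cap) ∧
    (∀ i, ccB_search cum cap lo hi ≤ i → i < cum.length → cap < cum.getD i 0) ∧
    ccB_search cum cap lo hi ≤ cum.length := by
  rw [ccB_search]
  by_cases h : lo < hi
  · simp only [if_pos h]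
    by_cases hc : cum.getD ((lo + hi) / 2) 0 ≤ cap
    · simp only [if_pos hc]
      exact ccB_search_spec cum cap ((lo + hi) / 2 + 1) hi mono hhi (by omega)
        (fun i hi' => le_trans (mono i ((lo + hi) / 2) (by omega) (by omega)) hc)
        habove
    · simp only [if_neg hc]
      exact ccB_search_spec cum cap lo ((lo + hi) / 2) mono (by omega) (by omega)
        hbelow
        (fun i hi' hilen =>
          lt_of_lt_of_le (by omega) (mono ((lo + hi) / 2) i hi' hilen))
  · simp only [if_neg h]
    exact ⟨hbelow, fun i hi' hilen => habove i (by omega) hilen, by omega⟩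
termination_by hi - lo
decreasing_by all_goals omega

theorem ccGreedy_eq_take (cap : Int) (segs : List String) (used : Int) (r : Nat)
    (hr : r ≤ segs.length)
    (hbelow : ∀ i, i < r → (ccB_cum segs used).getD i 0 ≤ cap)
    (habove : ∀ i, r ≤ i → i < segs.length → cap < (ccB_cum segs used).getD i 0) :
    ccGreedy cap segs used = segs.take r := by
  induction segs generalizing used r with
  | nil =>
    have : r = 0 := Nat.le_zero.mp (by simpa using hr)
    simp [ccGreedy, this]
  | cons s rest ih =>
    cases r with
    | zero =>
      have h0 := habove 0 (by omega) (by simp)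
      simp only [ccB_cum, List.getD_cons_zero] at h0
      simp only [ccGreedy, List.take_zero, if_pos (by omega : used + PySem.Str.len s > cap)]
    | succ r' =>
      have h0 := hbelow 0 (by omega)
      simp only [ccB_cum, List.getD_cons_zero] at h0
      simp only [ccGreedy, List.take_succ_cons, if_neg (by omega : ¬ used + PySem.Str.len s > cap)]
      congr 1
      exact ih (used + PySem.Str.len s) r' (by simpa using hr)
        (fun i hi => by
          have := hbelow (i + 1) (by omega)
          simpa [ccB_cum] using this)
        (fun i hi hilen => by
          have := habove (i + 1) (by omega) (by simpa using hilen)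
          simpa [ccB_cum] using this)

-- ===== VERDICT (by name: the statement is the Claim_ definition above) =====
theorem compose_context_spec : Claim_equal_compose_context := by
  intro documents metadatas cap _
  unfold Spec_compose_context compose_context compose_context_alt
  set segs := (documents.zip metadatas).map (fun p => ccB_seg p.1 p.2) with hsegs
  have hlen := ccB_cum_length segs 0
  have hspec := ccB_search_spec (ccB_cum segs 0) cap 0 (ccB_cum segs 0).length
    (fun i j hij hj => ccB_cum_mono segs 0 i j hij (by omega))
    (le_refl _) (by omega) (fun i hi => by omega) (fun i hi hilen => by omega)
  obtain ⟨hb, ha, hr⟩ := hspec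
  rw [ccA_loop_eq_greedy, List.nil_append, ← hsegs]
  congr 1
  exact ccGreedy_eq_take cap segs 0 _ (by omega) hb (fun i hi hilen => ha i hi (by omega))
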